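-- pv_equiv track=rewrite | github.com/OpenCMM/opencmm | server/server/mark/edge.py | delete_overlap_edges
-- ===== SOURCE A (Python) =====
-- def delete_overlap_edges(optimal_path: list):
--     """
--     Delete edges with the same x, y value and
--     keep the one with the highest z value
--     """
--     path = []
--     prev_xy = None
--     prev_z = None
--     for row in optimal_path:
--         _xy = (row[2], row[3])
--         if _xy == prev_xy:
--             if prev_z > row[4]:
--                 continue
--             else:
--                 path.pop()
--
--         prev_xy = _xy
--         prev_z = row[4]
--         path.append(row)
--     return path
-- ===== SOURCE B (Python) =====
-- def delete_overlap_edges(optimal_path: list):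
--     """
--     Delete edges with the same x, y value and
--     keep the one with the highest z value
--     """
--     n = len(optimal_path)
--     path = []
--     i = 0
--     while i < n:
--         best = optimal_path[i]
--         key = (best[2], best[3])
--         j = i + 1
--         while j < n and (optimal_path[j][2], optimal_path[j][3]) == key:
--             if optimal_path[j][4] >= best[4]:
--                 best = optimal_path[j]
--             j += 1
--         path.append(best)
--         i = j
--     return path
-- ===== Notes on version B (the rewrite author's own statement) =====
-- stated objective: alternative
-- what changed: Replaces A's prev_xy/prev_z state tracking with pop-and-replace output mutation by a partition-into-consecutive-runs structure: an outer loop advances run by run, an inner scan of each same-(x,y) run selects its last maximal-z row, and exactly one row per run is appended (never removed).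
import Mathlib
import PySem

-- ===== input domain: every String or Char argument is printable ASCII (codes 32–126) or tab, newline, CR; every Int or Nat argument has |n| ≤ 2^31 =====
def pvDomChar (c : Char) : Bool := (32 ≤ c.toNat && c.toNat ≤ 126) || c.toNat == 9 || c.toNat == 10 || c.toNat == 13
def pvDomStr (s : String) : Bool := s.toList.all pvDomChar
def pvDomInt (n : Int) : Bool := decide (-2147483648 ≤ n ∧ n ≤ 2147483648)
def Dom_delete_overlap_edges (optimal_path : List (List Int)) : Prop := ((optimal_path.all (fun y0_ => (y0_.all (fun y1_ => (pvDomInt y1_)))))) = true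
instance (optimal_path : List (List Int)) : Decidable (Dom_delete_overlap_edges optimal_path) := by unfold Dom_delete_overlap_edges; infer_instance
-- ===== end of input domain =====

-- B replaces A's prev-state tracking with pop-on-tie by a run-partition structure (one appended row per consecutive same-(x,y) run); alternative decomposition, same cost.


-- ===== PORT A =====
-- row[2], row[3], row[4]: under Pre_ (every row has length ≥ 5) these in-range
-- positive indices are List.getD; path.pop() removes the last element (path is
-- nonempty whenever A reaches it) = List.dropLast.
def pvStepA (st : List (List Int) × Option (Int × Int) × Option Int) (row : List Int) :
    List (List Int) × Option (Int × Int) × Option Int :=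
  let path := st.1
  let prev_xy := st.2.1
  let prev_z := st.2.2
  let _xy : Int × Int := (row.getD 2 0, row.getD 3 0)
  if some _xy = prev_xy then
    if prev_z.getD 0 > row.getD 4 0 then
      (path, prev_xy, prev_z)                               -- continue
    else
      (path.dropLast ++ [row], some _xy, some (row.getD 4 0))  -- pop, then append
  else
    (path ++ [row], some _xy, some (row.getD 4 0))

def delete_overlap_edges (optimal_path : List (List Int)) : List (List Int) :=
  (optimal_path.foldl pvStepA ([], none, none)).1

-- ===== PORT B =====
-- inner while loop of Source B: scan the run of rows whose (x,y) equals `k`,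
-- keeping the last row with maximal z; returns (best, remaining rows)
def pvRunBest (k : Int × Int) (best : List Int) : List (List Int) → List Int × List (List Int)
  | [] => (best, [])
  | r :: rs =>
    if (r.getD 2 0, r.getD 3 0) = k then
      pvRunBest k (if r.getD 4 0 ≥ best.getD 4 0 then r else best) rs
    else
      (best, r :: rs)

theorem pvRunBest_rest_length (k : Int × Int) (best : List Int) (l : List (List Int)) :
    (pvRunBest k best l).2.length ≤ l.length := by
  induction l generalizing best with
  | nil => simp [pvRunBest]
  | cons r rs ih =>
    simp only [pvRunBest]
    split
    · exact Nat.le_succ_of_le (ih _)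
    · simp

-- outer while loop of Source B
def delete_overlap_edges_alt (optimal_path : List (List Int)) : List (List Int) :=
  match optimal_path with
  | [] => []
  | h :: t =>
    (pvRunBest (h.getD 2 0, h.getD 3 0) h t).1 ::
      delete_overlap_edges_alt (pvRunBest (h.getD 2 0, h.getD 3 0) h t).2
termination_by optimal_path.length
decreasing_by
  exact Nat.lt_succ_of_le (pvRunBest_rest_length _ _ _)

-- ===== PRECONDITION & SPEC =====
-- Pre_: every row has at least 5 elements; on any other input A raises IndexError
-- at row[2]/row[3]/row[4] (and B raises there too).
def Pre_delete_overlap_edges (optimal_path : List (List Int)) : Prop :=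
  ∀ row ∈ optimal_path, 5 ≤ row.length
instance (optimal_path : List (List Int)) : Decidable (Pre_delete_overlap_edges optimal_path) := by
  unfold Pre_delete_overlap_edges; infer_instance
def pvWitness_delete_overlap_edges : List (List Int) :=
  [[0, 0, 1, 1, 3], [0, 0, 1, 1, 5], [0, 0, 2, 1, 4]]

def Spec_delete_overlap_edges (optimal_path : List (List Int)) (out : List (List Int)) : Prop := out = delete_overlap_edges_alt optimal_path
instance (optimal_path : List (List Int)) (out : List (List Int)) : Decidable (Spec_delete_overlap_edges optimal_path out) := by unfold Spec_delete_overlap_edges; infer_instance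

-- ===== CLAIM (what is proved, stated in full; the proofs are below) =====
def Claim_equal_delete_overlap_edges : Prop := ∀ (optimal_path : List (List Int)), Dom_delete_overlap_edges optimal_path → Pre_delete_overlap_edges optimal_path → Spec_delete_overlap_edges optimal_path (delete_overlap_edges optimal_path)

-- ===== LEMMAS AND PROOFS =====

-- Inside a run: folding A's step from state (p ++ [b], some k, some b[4]) over l
-- reaches the same state as jumping directly to the run's best row and its rest.
theorem pvRun_step (l : List (List Int)) (b : List Int) (p : List (List Int))
    (k : Int × Int) (hk : ((b.getD 2 0 : Int), (b.getD 3 0 : Int)) = k) :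
    List.foldl pvStepA (p ++ [b], some k, some (b.getD 4 0)) l =
      List.foldl pvStepA
        (p ++ [(pvRunBest k b l).1], some k, some ((pvRunBest k b l).1.getD 4 0))
        (pvRunBest k b l).2 := by
  induction l generalizing b with
  | nil => simp [pvRunBest]
  | cons r rs ih =>
    rw [pvRunBest]
    by_cases hr : ((r.getD 2 0 : Int), (r.getD 3 0 : Int)) = k
    · rw [if_pos hr]
      by_cases hz : (r.getD 4 0 : Int) ≥ b.getD 4 0
      · -- pop-and-replace branch of A; B replaces best with r
        have hA : pvStepA (p ++ [b], some k, some (b.getD 4 0)) r =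
            (p ++ [r], some k, some (r.getD 4 0)) := by
          simp only [pvStepA]
          rw [hr, if_pos rfl,
            if_neg (show ¬((some ((b.getD 4 0 : Int))).getD 0 > r.getD 4 0) from by
              simp only [Option.getD_some]; omega)]
          simp
        rw [List.foldl_cons, hA, if_pos hz]
        exact ih r hr
      · -- continue branch of A; B keeps best
        have hA : pvStepA (p ++ [b], some k, some (b.getD 4 0)) r =
            (p ++ [b], some k, some (b.getD 4 0)) := by
          simp only [pvStepA]
          rw [hr, if_pos rfl,
            if_pos (show (some ((b.getD 4 0 : Int))).getD 0 > r.getD 4 0 from by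
              simp only [Option.getD_some]; omega)]
        rw [List.foldl_cons, hA, if_neg hz]
        exact ih b hk
    · rw [if_neg hr]

-- The rest returned by pvRunBest starts (if nonempty) with a row of a different key.
theorem pvRunBest_rest_head (k : Int × Int) (b : List Int) (l : List (List Int))
    (h' : List Int) (hh : (pvRunBest k b l).2.head? = some h') :
    ((h'.getD 2 0 : Int), (h'.getD 3 0 : Int)) ≠ k := by
  induction l generalizing b with
  | nil => simp [pvRunBest] at hh
  | cons r rs ih =>
    rw [pvRunBest] at hh
    by_cases hr : ((r.getD 2 0 : Int), (r.getD 3 0 : Int)) = k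
    · rw [if_pos hr] at hh
      exact ih _ hh
    · rw [if_neg hr] at hh
      simp at hh
      exact hh ▸ hr

-- Main invariant: from any state whose prev key differs from the head's key,
-- folding A appends exactly B's output.
theorem pvMain (n : Nat) (l : List (List Int)) (hn : l.length ≤ n)
    (p : List (List Int)) (pk : Option (Int × Int)) (pz : Option Int)
    (hpk : ∀ h, l.head? = some h → pk ≠ some ((h.getD 2 0 : Int), (h.getD 3 0 : Int))) :
    (List.foldl pvStepA (p, pk, pz) l).1 = p ++ delete_overlap_edges_alt l := by
  induction n generalizing l p pk pz with
  | zero =>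
    have : l = [] := List.eq_nil_of_length_eq_zero (Nat.le_zero.mp hn)
    subst this; simp [delete_overlap_edges_alt]
  | succ n ih =>
    match l with
    | [] => simp [delete_overlap_edges_alt]
    | h :: t =>
      have hA : pvStepA (p, pk, pz) h =
          (p ++ [h], some ((h.getD 2 0 : Int), (h.getD 3 0 : Int)), some (h.getD 4 0)) := by
        simp only [pvStepA]
        rw [if_neg (fun he => (hpk h rfl) he.symm)]
      simp only [List.foldl_cons, hA]
      rw [pvRun_step t h p _ rfl]
      rw [ih _ (le_trans (pvRunBest_rest_length _ _ _) (by simpa using hn))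
          _ _ _ (fun h' hh he => pvRunBest_rest_head _ _ _ h' hh (Option.some.inj he).symm)]
      conv_rhs => rw [delete_overlap_edges_alt]
      simp
  -- end

-- ===== VERDICT (by name: the statement is the Claim_ definition above) =====
theorem delete_overlap_edges_spec : Claim_equal_delete_overlap_edges := by
  intro op _ _
  unfold Spec_delete_overlap_edges delete_overlap_edges
  have := pvMain op.length op le_rfl [] none none (by simp)
  simpa using this
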